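-- pv_equiv track=rewrite | github.com/mojamil/Advanced-Algorithms-Coursera | pa3_np_complete/gsm_network/gsm_network.py | convert
-- ===== SOURCE A (Python) =====
-- def convert(num,n):
--     counter=1
--     for i in range(1,n+1):
--         for j in range(1,4):
--             if i*10 + j == num:
--                 return counter
--             if -(i*10+j)== num:
--                 return -counter
--             counter+=1
--     return
-- ===== SOURCE B (Python) =====
-- def convert(num, n):
--     a = abs(num)
--     i, j = divmod(a, 10)
--     if 1 <= i <= n and 1 <= j <= 3:
--         idx = (i - 1) * 3 + j
--         return idx if num > 0 else -idx
--     return None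
-- ===== Notes on version B (the rewrite author's own statement) =====
-- stated objective: faster
-- what changed: Replaces the O(n) double loop that scans all 3n encoded values with a direct O(1) arithmetic decode via divmod(abs(num), 10) and a range check.
import Mathlib
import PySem

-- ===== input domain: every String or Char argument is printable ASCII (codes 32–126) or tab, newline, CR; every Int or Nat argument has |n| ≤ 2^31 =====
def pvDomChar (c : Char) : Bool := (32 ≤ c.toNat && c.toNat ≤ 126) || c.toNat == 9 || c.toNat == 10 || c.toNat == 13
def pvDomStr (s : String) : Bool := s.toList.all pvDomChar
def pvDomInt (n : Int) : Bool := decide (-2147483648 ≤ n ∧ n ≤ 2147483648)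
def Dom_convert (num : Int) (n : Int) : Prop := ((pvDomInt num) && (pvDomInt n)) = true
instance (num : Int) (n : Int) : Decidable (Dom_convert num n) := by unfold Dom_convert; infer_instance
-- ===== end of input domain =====

-- B replaces A's O(n) scan of all encoded values with an O(1) divmod decode; return values proved equal.

-- ===== PORT A =====
-- inner 'for j in range(1,4)' loop: returns (some result, _) on early return, else (none, final counter)
def convertInner (num i counter : Int) : List Int → Option Int × Int
  | [] => (none, counter)
  | j :: js =>
    if i * 10 + j = num then (some counter, counter)
    else if -(i * 10 + j) = num then (some (-counter), counter)
    else convertInner num i (counter + 1) js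

-- outer 'for i in range(1,n+1)' loop, threading counter
def convertOuter (num : Int) : Int → List Int → Option Int
  | _, [] => none
  | c, i :: is =>
    match convertInner num i c (PySem.List.pyRange 1 4 1) with
    | (some r, _) => some r
    | (none, c') => convertOuter num c' is

def convert (num : Int) (n : Int) : Option Int :=
  convertOuter num 1 (PySem.List.pyRange 1 (n + 1) 1)

-- ===== PORT B =====
def convert_alt (num : Int) (n : Int) : Option Int :=
  let a := |num|
  let i := PySem.Int.floordiv a 10
  let j := PySem.Int.mod a 10
  if 1 ≤ i ∧ i ≤ n ∧ 1 ≤ j ∧ j ≤ 3 then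
    let idx := (i - 1) * 3 + j
    some (if 0 < num then idx else -idx)
  else none

-- ===== PRECONDITION & SPEC =====
def Spec_convert (num : Int) (n : Int) (out : Option Int) : Prop := out = convert_alt num n
instance (num : Int) (n : Int) (out : Option Int) : Decidable (Spec_convert num n out) := by unfold Spec_convert; infer_instance

-- ===== CLAIM (what is proved, stated in full; the proofs are below) =====
def Claim_equal_convert : Prop := ∀ (num : Int) (n : Int), Dom_convert num n → Spec_convert num n (convert num n)

-- ===== LEMMAS AND PROOFS =====
def pvI0 (num : Int) : Int := PySem.Int.floordiv |num| 10
def pvJ0 (num : Int) : Int := PySem.Int.mod |num| 10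

theorem pvFacts (num : Int) : pvI0 num * 10 + pvJ0 num = |num| ∧ 0 ≤ pvJ0 num ∧ pvJ0 num < 10 := by
  unfold pvI0 pvJ0
  refine ⟨PySem.Int.floordiv_mul_add_mod _ _, ?_, ?_⟩
  · rw [PySem.Int.mod_eq_emod_of_pos (by norm_num)]
    exact Int.emod_nonneg _ (by norm_num)
  · rw [PySem.Int.mod_eq_emod_of_pos (by norm_num)]
    exact Int.emod_lt_of_pos _ (by norm_num)

theorem pvRange14 : PySem.List.pyRange 1 4 1 = [1, 2, 3] := by decide

theorem pvOuterSpec (k : Nat) : ∀ (a num : Int), 1 ≤ a →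
    convertOuter num ((a - 1) * 3 + 1) (PySem.List.pyRange a (a + k) 1) =
      (if a ≤ pvI0 num ∧ pvI0 num < a + k ∧ 1 ≤ pvJ0 num ∧ pvJ0 num ≤ 3
       then some (if 0 < num then (pvI0 num - 1) * 3 + pvJ0 num
                  else -((pvI0 num - 1) * 3 + pvJ0 num))
       else none) := by
  induction k with
  | zero =>
    intro a num ha
    rw [PySem.List.pyRange_one_eq_nil (by omega)]
    rw [if_neg (by omega)]
    simp [convertOuter]
  | succ k ih =>
    intro a num ha
    obtain ⟨hm, hj0, hj10⟩ := pvFacts num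
    rcases abs_cases num with ⟨habs, hs⟩ | ⟨habs, hs⟩ <;>
    · rw [habs] at hm
      push_cast
      rw [show (a + ((k : Int) + 1)) = (a + 1) + k by ring,
          PySem.List.pyRange_one_cons (by omega)]
      simp only [convertOuter, pvRange14, convertInner]
      by_cases h1 : a * 10 + 1 = num
      · rw [if_pos h1, if_pos (by omega)]
        simp only [Option.some.injEq]
        split_ifs <;> omega
      · rw [if_neg h1]
        by_cases h1n : -(a * 10 + 1) = num
        · rw [if_pos h1n, if_pos (by omega)]
          simp only [Option.some.injEq]
          split_ifs <;> omega
        · rw [if_neg h1n]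
          by_cases h2 : a * 10 + 2 = num
          · rw [if_pos h2, if_pos (by omega)]
            simp only [Option.some.injEq]
            split_ifs <;> omega
          · rw [if_neg h2]
            by_cases h2n : -(a * 10 + 2) = num
            · rw [if_pos h2n, if_pos (by omega)]
              simp only [Option.some.injEq]
              split_ifs <;> omega
            · rw [if_neg h2n]
              by_cases h3 : a * 10 + 3 = num
              · rw [if_pos h3, if_pos (by omega)]
                simp only [Option.some.injEq]
                split_ifs <;> omega
              · rw [if_neg h3]
                by_cases h3n : -(a * 10 + 3) = num
                · rw [if_pos h3n, if_pos (by omega)]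
                  simp only [Option.some.injEq]
                  split_ifs <;> omega
                · rw [if_neg h3n]
                  have := ih (a + 1) num (by omega)
                  rw [show ((a - 1) * 3 + 1 + 1 + 1 + 1) = ((a + 1) - 1) * 3 + 1 by ring]
                  dsimp only
                  rw [this]
                  have hne : ¬ (pvI0 num = a ∧ 1 ≤ pvJ0 num ∧ pvJ0 num ≤ 3) := by
                    rintro ⟨hi, hj1, hj3⟩
                    interval_cases h : pvJ0 num <;> omega
                  by_cases hw : a + 1 ≤ pvI0 num ∧ pvI0 num < a + 1 + (k : Int) ∧ 1 ≤ pvJ0 num ∧ pvJ0 num ≤ 3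
                  · have hcond : a ≤ pvI0 num ∧ pvI0 num < a + 1 + (k : Int) ∧ 1 ≤ pvJ0 num ∧ pvJ0 num ≤ 3 := by omega
                    rw [if_pos hw, if_pos hcond]
                  · have hcond : ¬(a ≤ pvI0 num ∧ pvI0 num < a + 1 + (k : Int) ∧ 1 ≤ pvJ0 num ∧ pvJ0 num ≤ 3) := by omega
                    rw [if_neg hw, if_neg hcond]

-- ===== VERDICT (by name: the statement is the Claim_ definition above) =====
theorem convert_spec : Claim_equal_convert := by
  intro num n _
  unfold Spec_convert convert convert_alt
  obtain ⟨hm, hj0, hj10⟩ := pvFacts num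
  have hI : PySem.Int.floordiv |num| 10 = pvI0 num := rfl
  have hJ : PySem.Int.mod |num| 10 = pvJ0 num := rfl
  simp only [hI, hJ]
  by_cases hn : 1 ≤ n
  · have hk : n + 1 = 1 + (n.toNat : Int) := by omega
    have hout := pvOuterSpec n.toNat 1 num le_rfl
    rw [show ((1 : Int) - 1) * 3 + 1 = 1 by norm_num] at hout
    rw [hk, hout]
    have hi0 : 0 ≤ pvI0 num := by
      rcases abs_cases num with ⟨habs, hs⟩ | ⟨habs, hs⟩ <;> omega
    by_cases hw : 1 ≤ pvI0 num ∧ pvI0 num ≤ n ∧ 1 ≤ pvJ0 num ∧ pvJ0 num ≤ 3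
    · rw [if_pos (by omega), if_pos hw]
    · rw [if_neg (by omega), if_neg hw]
  · rw [PySem.List.pyRange_one_eq_nil (by omega)]
    have hi0 : 0 ≤ pvI0 num := by
      rcases abs_cases num with ⟨habs, hs⟩ | ⟨habs, hs⟩ <;> omega
    rw [if_neg (by omega)]
    simp [convertOuter]
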